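-- pv_equiv track=rewrite | github.com/HaJunYoo/algorithm-study | Greedy/Programmers/마법의 엘레베이터.py | solution
-- ===== SOURCE A (Python) =====
-- def solution(storey):
--     answer = 0
--
--     while storey:
--         digit = storey % 10
--         next_digit = (storey // 10) % 10
--
--         # 현재 자릿수가 5보다 크다면 10으로 올리는 편이 나음
--         # 현재 자릿수가 5이지만, 다음 자릿수가 5이상일 때
--         if digit > 5 or (digit == 5 and next_digit >= 5):
--             # 10의 자릿수로 올리기 위한 클릭수
--             answer += (10 - digit)
--             # 10의 자리를 한번 올림
--             storey += 10
--         else: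
--             # 그렇지 않으면 해당 자릿수 * -1을 눌러서 내리는 것이 빠름
--             answer += digit
--
--         # 10으로 나눈 몫
--         storey //= 10
--
--     return answer
-- ===== SOURCE B (Python) =====
-- def solution(storey):
--     # Recursive minimization over the digits: for each lowest digit d choose the
--     # cheaper of pressing -1 d times (round down) or +1 (10-d) times plus a carry
--     # into the higher digits (round up).  abs() handles basement floors by symmetry.
--     storey = abs(storey)
--     if storey < 10:
--         return min(storey, 11 - storey)
--     d = storey % 10
--     return min(d + solution(storey // 10), (10 - d) + solution(storey // 10 + 1))
-- ===== Notes on version B (the rewrite author's own statement) =====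
-- stated objective: alternative
-- what changed: Replaces A's committed per-digit greedy while-loop (with an accumulator and a lookahead at the next digit) by a recursive minimization over the digits: min of the round-down branch and the round-up-with-carry branch, with a closed-form base case for single digits; abs() covers negative storeys, where A's floor-division digits happen to give the same value as for |storey|.
import Mathlib
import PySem

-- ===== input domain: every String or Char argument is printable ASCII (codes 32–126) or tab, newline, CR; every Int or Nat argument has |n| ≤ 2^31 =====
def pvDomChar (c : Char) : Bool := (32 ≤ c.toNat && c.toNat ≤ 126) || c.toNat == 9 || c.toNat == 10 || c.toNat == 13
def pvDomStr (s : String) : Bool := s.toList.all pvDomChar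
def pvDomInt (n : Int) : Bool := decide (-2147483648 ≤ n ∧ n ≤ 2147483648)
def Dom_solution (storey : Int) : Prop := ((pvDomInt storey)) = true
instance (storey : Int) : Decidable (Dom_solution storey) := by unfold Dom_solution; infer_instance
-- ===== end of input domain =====

-- B replaces A's committed per-digit greedy loop by a recursive minimization over the
-- digits (round-down vs round-up-with-carry); same value on every 32-bit storey.

-- ===== PORT A =====
-- the while loop of A, with the running 'answer' as an accumulator
def solutionGo (storey answer : Int) : Int :=
  if storey = 0 then answer
  else if PySem.Int.mod storey 10 > 5 ∨
          (PySem.Int.mod storey 10 = 5 ∧ PySem.Int.mod (PySem.Int.floordiv storey 10) 10 ≥ 5) then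
    -- answer += (10 - digit); storey += 10; storey //= 10
    solutionGo (PySem.Int.floordiv (storey + 10) 10) (answer + (10 - PySem.Int.mod storey 10))
  else
    -- answer += digit; storey //= 10
    solutionGo (PySem.Int.floordiv storey 10) (answer + PySem.Int.mod storey 10)
termination_by storey.natAbs
decreasing_by
  · rw [PySem.Int.floordiv_eq_ediv_of_pos (by norm_num)]
    rw [PySem.Int.mod_eq_emod_of_pos (by norm_num),
        PySem.Int.mod_eq_emod_of_pos (by norm_num),
        PySem.Int.floordiv_eq_ediv_of_pos (by norm_num)] at *
    omega
  · rw [PySem.Int.floordiv_eq_ediv_of_pos (by norm_num)]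
    rw [PySem.Int.mod_eq_emod_of_pos (by norm_num),
        PySem.Int.mod_eq_emod_of_pos (by norm_num),
        PySem.Int.floordiv_eq_ediv_of_pos (by norm_num)] at *
    omega

def solution (storey : Int) : Int := solutionGo storey 0

-- ===== PORT B =====
def solution_alt (storey : Int) : Int :=
  -- storey = abs(storey)
  if |storey| < 10 then min |storey| (11 - |storey|)
  else
    min (PySem.Int.mod |storey| 10 + solution_alt (PySem.Int.floordiv |storey| 10))
        ((10 - PySem.Int.mod |storey| 10) + solution_alt (PySem.Int.floordiv |storey| 10 + 1))
termination_by storey.natAbs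
decreasing_by
  · rw [PySem.Int.floordiv_eq_ediv_of_pos (by norm_num)]
    simp only [Int.abs_eq_natAbs] at *
    omega
  · rw [PySem.Int.floordiv_eq_ediv_of_pos (by norm_num)]
    simp only [Int.abs_eq_natAbs] at *
    omega

-- ===== PRECONDITION & SPEC =====
def Spec_solution (storey : Int) (out : Int) : Prop := out = solution_alt storey
instance (storey : Int) (out : Int) : Decidable (Spec_solution storey out) := by unfold Spec_solution; infer_instance

-- ===== CLAIM (what is proved, stated in full; the proofs are below) =====
def Claim_equal_solution : Prop := ∀ (storey : Int), Dom_solution storey → Spec_solution storey (solution storey)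

-- ===== LEMMAS AND PROOFS =====

-- Nat model of B's recursion (value in Int)
def fModel (n : Nat) : Int :=
  if n < 10 then min (n : Int) (11 - (n : Int))
  else min ((n % 10 : Nat) + fModel (n / 10)) ((10 - (n % 10 : Nat)) + fModel (n / 10 + 1))
termination_by n
decreasing_by
  · omega
  · omega

-- Nat model of A's loop (digit pattern of |storey|)
def gModel (n : Nat) (acc : Int) : Int :=
  if n = 0 then acc
  else if n % 10 > 5 ∨ (n % 10 = 5 ∧ (n / 10) % 10 ≥ 5) then
    gModel ((n + 10) / 10) (acc + (10 - (n % 10 : Nat)))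
  else
    gModel (n / 10) (acc + (n % 10 : Nat))
termination_by n
decreasing_by
  · omega
  · omega

theorem fModel_unfold (m : Nat) : fModel m =
    if m < 10 then min (m : Int) (11 - (m : Int))
    else min ((m % 10 : Nat) + fModel (m / 10)) ((10 - (m % 10 : Nat)) + fModel (m / 10 + 1)) := by
  rw [fModel]

theorem fModel_lit_1 : fModel 1 = 1 := by rw [fModel]; norm_num
theorem fModel_lit_2 : fModel 2 = 2 := by rw [fModel]; norm_num [min_def]
theorem fModel_lit_9 : fModel 9 = 2 := by rw [fModel]; norm_num [min_def]
theorem fModel_lit_10 : fModel 10 = 1 := by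
  rw [fModel]; norm_num [fModel_lit_1, fModel_lit_2, min_def]

theorem fModel_step (n : Nat) :
    fModel (n + 1) ≤ fModel n + 1 ∧ fModel n ≤ fModel (n + 1) + 1 := by
  induction n using Nat.strong_induction_on with
  | _ n ih =>
    by_cases h8 : n ≤ 8
    · rw [fModel_unfold (n + 1), fModel_unfold n, if_pos (by omega : n + 1 < 10), if_pos (by omega : n < 10)]
      simp only [min_def]; split_ifs <;> constructor <;> push_cast <;> omega
    · by_cases h9 : n = 9
      · subst h9
        rw [show (9:Nat) + 1 = 10 from rfl, fModel_lit_9, fModel_lit_10]; omega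
      · -- n ≥ 10
        have hn : 10 ≤ n := by omega
        have ihX := ih (n / 10) (by omega)
        have ihY := ih (n / 10 + 1) (by omega)
        by_cases hd : n % 10 ≤ 8
        · have e1 : (n + 1) / 10 = n / 10 := by omega
          have e2 : (n + 1) % 10 = n % 10 + 1 := by omega
          rw [fModel_unfold (n + 1), fModel_unfold n, if_neg (by omega : ¬ n + 1 < 10),
              if_neg (by omega : ¬ n < 10), e1, e2]
          simp only [min_def]; split_ifs <;> constructor <;> push_cast <;> omega
        · have e1 : (n + 1) / 10 = n / 10 + 1 := by omega
          have e2 : (n + 1) % 10 = 0 := by omega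
          have e3 : n / 10 + 1 + 1 = n / 10 + 2 := by omega
          rw [e3] at ihY
          rw [fModel_unfold (n + 1), fModel_unfold n, if_neg (by omega : ¬ n + 1 < 10),
              if_neg (by omega : ¬ n < 10), e1, e2, e3]
          simp only [min_def]; split_ifs <;> constructor <;> push_cast <;> omega

theorem fModel_carry_le (n : Nat) (h : n % 10 ≥ 5) : fModel (n + 1) ≤ fModel n := by
  by_cases h8 : n ≤ 8
  · rw [fModel_unfold (n + 1), fModel_unfold n, if_pos (by omega : n + 1 < 10),
        if_pos (by omega : n < 10)]
    simp only [min_def]; split_ifs <;> push_cast <;> omega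
  · by_cases h9 : n = 9
    · subst h9; rw [show (9:Nat) + 1 = 10 from rfl, fModel_lit_9, fModel_lit_10]; omega
    · have hstep := fModel_step (n / 10)
      by_cases hd : n % 10 ≤ 8
      · have e1 : (n + 1) / 10 = n / 10 := by omega
        have e2 : (n + 1) % 10 = n % 10 + 1 := by omega
        rw [fModel_unfold (n + 1), fModel_unfold n, if_neg (by omega : ¬ n + 1 < 10),
            if_neg (by omega : ¬ n < 10), e1, e2]
        simp only [min_def]; split_ifs <;> push_cast <;> omega
      · have e1 : (n + 1) / 10 = n / 10 + 1 := by omega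
        have e2 : (n + 1) % 10 = 0 := by omega
        have e3 : n / 10 + 1 + 1 = n / 10 + 2 := by omega
        rw [fModel_unfold (n + 1), fModel_unfold n, if_neg (by omega : ¬ n + 1 < 10),
            if_neg (by omega : ¬ n < 10), e1, e2, e3]
        simp only [min_def]; split_ifs <;> push_cast <;> omega

theorem fModel_le_succ (n : Nat) (h : n % 10 ≤ 4) : fModel n ≤ fModel (n + 1) := by
  by_cases h8 : n ≤ 8
  · rw [fModel_unfold (n + 1), fModel_unfold n, if_pos (by omega : n + 1 < 10),
        if_pos (by omega : n < 10)]
    simp only [min_def]; split_ifs <;> push_cast <;> omega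
  · by_cases h9 : n = 9
    · exact absurd h (by subst h9; norm_num)
    · have hstep := fModel_step (n / 10)
      have e1 : (n + 1) / 10 = n / 10 := by omega
      have e2 : (n + 1) % 10 = n % 10 + 1 := by omega
      rw [fModel_unfold (n + 1), fModel_unfold n, if_neg (by omega : ¬ n + 1 < 10),
          if_neg (by omega : ¬ n < 10), e1, e2]
      simp only [min_def]; split_ifs <;> push_cast <;> omega

-- the min of B picks exactly the branch A's greedy picks
theorem fModel_lit_0 : fModel 0 = 0 := by rw [fModel]; norm_num

theorem fModel_sel (n : Nat) (_h : n ≠ 0) :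
    fModel n = if n % 10 > 5 ∨ (n % 10 = 5 ∧ (n / 10) % 10 ≥ 5)
               then (10 - (n % 10 : Nat)) + fModel (n / 10 + 1)
               else ((n % 10 : Nat) : Int) + fModel (n / 10) := by
  by_cases h10 : n < 10
  · rw [fModel_unfold n, if_pos h10, show n / 10 = 0 from by omega,
        show n % 10 = n from by omega, show (0:Nat) + 1 = 1 from rfl, fModel_lit_1, fModel_lit_0]
    split_ifs with hc <;> simp only [min_def] <;> split_ifs <;> push_cast at * <;> omega
  · rw [fModel_unfold n, if_neg h10]
    by_cases hc : n % 10 > 5 ∨ (n % 10 = 5 ∧ (n / 10) % 10 ≥ 5)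
    · rw [if_pos hc]
      refine min_eq_right ?_
      rcases hc with h6 | ⟨h5, hn5⟩
      · have := fModel_step (n / 10); omega
      · have := fModel_carry_le (n / 10) hn5; omega
    · rw [if_neg hc]
      refine min_eq_left ?_
      push Not at hc
      by_cases h5 : n % 10 = 5
      · have := fModel_le_succ (n / 10) (by omega)
        omega
      · have := fModel_step (n / 10)
        have hlt : n % 10 < 5 := by omega
        omega

theorem gModel_unfold (n : Nat) (acc : Int) : gModel n acc =
    if n = 0 then acc
    else if n % 10 > 5 ∨ (n % 10 = 5 ∧ (n / 10) % 10 ≥ 5) then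
      gModel ((n + 10) / 10) (acc + (10 - (n % 10 : Nat)))
    else gModel (n / 10) (acc + (n % 10 : Nat)) := by
  rw [gModel]

theorem gModel_eq_fModel (n : Nat) (acc : Int) : gModel n acc = acc + fModel n := by
  induction n using Nat.strong_induction_on generalizing acc with
  | _ n ih =>
    by_cases h0 : n = 0
    · subst h0; rw [gModel_unfold, if_pos rfl, fModel_lit_0]; ring
    · rw [gModel_unfold n, if_neg h0, fModel_sel n h0]
      split_ifs with hc
      · have ha : (n + 10) / 10 = n / 10 + 1 := by omega
        rw [ha, ih (n / 10 + 1) (by omega)]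
        ring
      · rw [ih (n / 10) (by omega)]
        ring

theorem solutionGo_unfold (s acc : Int) : solutionGo s acc =
    if s = 0 then acc
    else if s % 10 > 5 ∨ (s % 10 = 5 ∧ (s / 10) % 10 ≥ 5) then
      solutionGo ((s + 10) / 10) (acc + (10 - s % 10))
    else solutionGo (s / 10) (acc + s % 10) := by
  rw [solutionGo]
  simp only [PySem.Int.mod_eq_emod_of_pos (by norm_num : (0:Int) < 10),
             PySem.Int.floordiv_eq_ediv_of_pos (by norm_num : (0:Int) < 10)]

theorem solutionGo_eq_gModel (n : Nat) : ∀ (s : Int), s.natAbs = n → ∀ (acc : Int),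
    solutionGo s acc = gModel n acc := by
  induction n using Nat.strong_induction_on with
  | _ n ih =>
    intro s hs acc
    rw [solutionGo_unfold, gModel_unfold n]
    by_cases h0 : s = 0
    · subst h0
      rw [if_pos rfl, if_pos (by omega : n = 0)]
    · rw [if_neg h0, if_neg (by omega : ¬ n = 0)]
      by_cases hic : s % 10 > 5 ∨ (s % 10 = 5 ∧ (s / 10) % 10 ≥ 5) <;>
        by_cases hnc : n % 10 > 5 ∨ (n % 10 = 5 ∧ (n / 10) % 10 ≥ 5)
      · rw [if_pos hic, if_pos hnc,
            show acc + (10 - s % 10) = acc + (10 - ((n % 10 : Nat) : Int)) from by omega]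
        exact ih ((n + 10) / 10) (by omega) _ (by omega) _
      · rw [if_pos hic, if_neg hnc,
            show acc + (10 - s % 10) = acc + ((n % 10 : Nat) : Int) from by omega]
        exact ih (n / 10) (by omega) _ (by omega) _
      · rw [if_neg hic, if_pos hnc,
            show acc + s % 10 = acc + (10 - ((n % 10 : Nat) : Int)) from by omega]
        exact ih ((n + 10) / 10) (by omega) _ (by omega) _
      · rw [if_neg hic, if_neg hnc,
            show acc + s % 10 = acc + ((n % 10 : Nat) : Int) from by omega]
        exact ih (n / 10) (by omega) _ (by omega) _

theorem solution_alt_unfold (s : Int) : solution_alt s =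
    if |s| < 10 then min |s| (11 - |s|)
    else min (|s| % 10 + solution_alt (|s| / 10))
             ((10 - |s| % 10) + solution_alt (|s| / 10 + 1)) := by
  rw [solution_alt]
  simp only [PySem.Int.mod_eq_emod_of_pos (by norm_num : (0:Int) < 10),
             PySem.Int.floordiv_eq_ediv_of_pos (by norm_num : (0:Int) < 10)]

theorem solution_alt_eq_fModel (n : Nat) : ∀ (s : Int), s.natAbs = n →
    solution_alt s = fModel n := by
  induction n using Nat.strong_induction_on with
  | _ n ih =>
    intro s hs
    have habs : |s| = (n : Int) := by rw [Int.abs_eq_natAbs, hs]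
    rw [solution_alt_unfold, fModel_unfold n, habs]
    by_cases h10 : n < 10
    · rw [if_pos (by exact_mod_cast h10), if_pos h10]
    · rw [if_neg (by omega), if_neg h10,
          show (n : Int) % 10 = ((n % 10 : Nat) : Int) from by omega,
          show (n : Int) / 10 = ((n / 10 : Nat) : Int) from by omega,
          show ((n / 10 : Nat) : Int) + 1 = ((n / 10 + 1 : Nat) : Int) from by push_cast; ring,
          ih (n / 10) (by omega) ((n / 10 : Nat) : Int) (by omega),
          ih (n / 10 + 1) (by omega) ((n / 10 + 1 : Nat) : Int) (by omega)]

-- ===== VERDICT (by name: the statement is the Claim_ definition above) =====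
theorem solution_spec : Claim_equal_solution := by
  intro s _
  unfold Spec_solution solution
  rw [solutionGo_eq_gModel s.natAbs s rfl 0, gModel_eq_fModel,
      solution_alt_eq_fModel s.natAbs s rfl]
  ring
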